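-- pv_equiv track=rewrite | github.com/TheManOfTeel/foobar | Level 4/Challenge 2/BingingAGunToATrainerFight.py | mirror_coordinates
-- ===== SOURCE A (Python) =====
-- def mirror_coordinates(mirror, coordinates, dimensions):
--     mirrored_coordinates = coordinates
--     mirror_rotation = [2 * coordinates, 2 * (dimensions - coordinates)]
--     if(mirror < 0):
--         for i in range(mirror, 0):
--             mirrored_coordinates -= mirror_rotation[(i + 1) % 2]
--     else:
--         for i in range(mirror, 0, -1):
--             mirrored_coordinates += mirror_rotation[i % 2]
--     return mirrored_coordinates
-- ===== SOURCE B (Python) =====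
-- def mirror_coordinates(mirror, coordinates, dimensions):
--     # Closed form: count odd/even reflection steps by parity and multiply.
--     if mirror >= 0:
--         odd = (mirror + 1) // 2   # steps i in 1..mirror with i odd
--         even = mirror // 2
--         return coordinates + odd * 2 * (dimensions - coordinates) + even * 2 * coordinates
--     n = -mirror
--     odd = (n + 1) // 2            # steps i in mirror..-1 with i odd
--     even = n // 2
--     return coordinates - odd * 2 * coordinates - even * 2 * (dimensions - coordinates)
-- ===== Notes on version B (the rewrite author's own statement) =====
-- stated objective: faster
-- what changed: Replaced A's per-step loop over range(mirror, 0, ±1) with an O(1) closed form that counts the odd-parity and even-parity reflection steps by integer division and multiplies each count by its offset.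
import Mathlib
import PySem

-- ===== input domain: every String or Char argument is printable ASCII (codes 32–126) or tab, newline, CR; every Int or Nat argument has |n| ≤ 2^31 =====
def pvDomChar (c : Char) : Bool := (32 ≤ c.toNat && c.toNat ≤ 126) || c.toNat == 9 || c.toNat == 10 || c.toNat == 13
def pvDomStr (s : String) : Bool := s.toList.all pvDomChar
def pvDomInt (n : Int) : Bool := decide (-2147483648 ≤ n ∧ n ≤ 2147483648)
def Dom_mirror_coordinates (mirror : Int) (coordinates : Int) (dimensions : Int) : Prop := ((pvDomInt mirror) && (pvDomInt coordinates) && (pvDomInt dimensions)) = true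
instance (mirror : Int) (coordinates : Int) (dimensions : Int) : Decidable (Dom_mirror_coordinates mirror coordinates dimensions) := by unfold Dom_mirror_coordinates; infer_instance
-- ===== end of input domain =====

-- B replaces A's per-step loop by an O(1) closed form counting odd/even reflection steps by parity.

-- ===== PORT A =====
-- literal transliteration; the list index (i±…) % 2 is always 0 or 1, in range, so pyGetD's default is never used
def mirror_coordinates (mirror : Int) (coordinates : Int) (dimensions : Int) : Int :=
  let mirrored := coordinates
  let mirror_rotation : List Int := [2 * coordinates, 2 * (dimensions - coordinates)]
  if mirror < 0 then
    (PySem.List.pyRange mirror 0 1).foldl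
      (fun acc i => acc - PySem.List.pyGetD mirror_rotation (PySem.Int.mod (i + 1) 2) 0) mirrored
  else
    (PySem.List.pyRange mirror 0 (-1)).foldl
      (fun acc i => acc + PySem.List.pyGetD mirror_rotation (PySem.Int.mod i 2) 0) mirrored

-- ===== PORT B =====
-- Source B's locals odd/even/n are inlined here (same expressions)
def mirror_coordinates_alt (mirror : Int) (coordinates : Int) (dimensions : Int) : Int :=
  if 0 ≤ mirror then
    coordinates + PySem.Int.floordiv (mirror + 1) 2 * 2 * (dimensions - coordinates)
      + PySem.Int.floordiv mirror 2 * 2 * coordinates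
  else
    coordinates - PySem.Int.floordiv (-mirror + 1) 2 * 2 * coordinates
      - PySem.Int.floordiv (-mirror) 2 * 2 * (dimensions - coordinates)

-- ===== PRECONDITION & SPEC =====
def Spec_mirror_coordinates (mirror : Int) (coordinates : Int) (dimensions : Int) (out : Int) : Prop := out = mirror_coordinates_alt mirror coordinates dimensions
instance (mirror : Int) (coordinates : Int) (dimensions : Int) (out : Int) : Decidable (Spec_mirror_coordinates mirror coordinates dimensions out) := by unfold Spec_mirror_coordinates; infer_instance

-- ===== CLAIM (what is proved, stated in full; the proofs are below) =====
def Claim_equal_mirror_coordinates : Prop := ∀ (mirror : Int) (coordinates : Int) (dimensions : Int), Dom_mirror_coordinates mirror coordinates dimensions → Spec_mirror_coordinates mirror coordinates dimensions (mirror_coordinates mirror coordinates dimensions)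

-- ===== LEMMAS AND PROOFS =====

-- the step value A adds in the non-negative branch, as an if on parity
theorem pv_g_eval (c d i : Int) :
    PySem.List.pyGetD [2 * c, 2 * (d - c)] (PySem.Int.mod i 2) 0
    = if i % 2 = 0 then 2 * c else 2 * (d - c) := by
  rw [PySem.Int.mod_eq_emod_of_pos (by norm_num)]
  rcases Int.emod_two_eq i with h | h <;>
    simp [h, PySem.List.pyGetD, PySem.List.pyGet?, PySem.List.pyIdx?]

-- the non-negative loop: sum over range(m, 0, -1)
theorem pv_pos_sum (c d : Int) : ∀ (m : Nat),
    ((PySem.List.pyRange (m : Int) 0 (-1)).map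
      (fun i => if i % 2 = 0 then 2 * c else 2 * (d - c))).sum
    = ((m : Int) + 1) / 2 * (2 * (d - c)) + (m : Int) / 2 * (2 * c) := by
  intro m
  induction m with
  | zero => simp [PySem.List.pyRange_neg_one_eq_nil (by norm_num : (0:Int) ≤ 0)]
  | succ m ih =>
    rw [PySem.List.pyRange_neg_one_cons (by push_cast; omega)]
    push_cast
    rw [List.map_cons, List.sum_cons,
        show ((m : Int) + 1 - 1) = (m : Int) from by ring, ih]
    rcases Int.emod_two_eq (m : Int) with h | h
    · have h1 : ((m : Int) + 1) % 2 = 1 := by omega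
      have e1 : ((m : Int) + 1 + 1) / 2 = ((m : Int) + 1) / 2 + 1 := by omega
      have e2 : ((m : Int) + 1) / 2 = (m : Int) / 2 := by omega
      rw [if_neg (by omega), e1, e2]; ring
    · have e1 : ((m : Int) + 1 + 1) / 2 = ((m : Int) + 1) / 2 := by omega
      have e2 : ((m : Int) + 1) / 2 = (m : Int) / 2 + 1 := by omega
      rw [if_pos (by omega), e1, e2]; ring

-- the negative loop: sum over range(-n, 0)
theorem pv_neg_sum (c d : Int) : ∀ (n : Nat),
    ((PySem.List.pyRange (-(n : Int)) 0 1).map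
      (fun i => if (i + 1) % 2 = 0 then 2 * c else 2 * (d - c))).sum
    = ((n : Int) + 1) / 2 * (2 * c) + (n : Int) / 2 * (2 * (d - c)) := by
  intro n
  induction n with
  | zero => simp [PySem.List.pyRange_one_eq_nil (by norm_num : (0:Int) ≤ 0)]
  | succ n ih =>
    rw [PySem.List.pyRange_one_cons (by push_cast; omega)]
    push_cast
    rw [List.map_cons, List.sum_cons,
        show (-((n : Int) + 1) + 1) = -(n : Int) from by ring]
    push_cast at ih
    rw [ih]
    rcases Int.emod_two_eq (n : Int) with h | h
    · have hm : -((n : Int)) % 2 = 0 := by omega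
      have e1 : ((n : Int) + 1 + 1) / 2 = ((n : Int) + 1) / 2 + 1 := by omega
      have e2 : ((n : Int) + 1) / 2 = (n : Int) / 2 := by omega
      rw [if_pos hm, e1, e2]; ring
    · have hm : -((n : Int)) % 2 = 1 := by omega
      have e1 : ((n : Int) + 1 + 1) / 2 = ((n : Int) + 1) / 2 := by omega
      have e2 : ((n : Int) + 1) / 2 = (n : Int) / 2 + 1 := by omega
      rw [if_neg (by omega), e1, e2]; ring

-- sum of pointwise negations
theorem pv_sum_map_neg {α : Type} (f : α → Int) (l : List α) :
    (l.map (fun x => -(f x))).sum = -((l.map f).sum) := by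
  induction l with
  | nil => simp
  | cons a t ih => simp only [List.map_cons, List.sum_cons, ih]; ring

-- subtraction fold as an additive fold
theorem pv_foldl_sub {α : Type} (g : α → Int) (l : List α) (a : Int) :
    l.foldl (fun acc x => acc - g x) a = a + (l.map (fun x => -(g x))).sum := by
  have : (fun (acc : Int) x => acc - g x) = (fun acc x => acc + (-(g x))) := by
    funext acc x; ring
  rw [this, PySem.List.foldl_add]

-- ===== VERDICT (by name: the statement is the Claim_ definition above) =====
theorem mirror_coordinates_spec : Claim_equal_mirror_coordinates := by
  intro mirror c d _
  unfold Spec_mirror_coordinates mirror_coordinates mirror_coordinates_alt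
  by_cases hm : mirror < 0
  · rw [if_pos hm, if_neg (by omega)]
    obtain ⟨n, rfl⟩ : ∃ n : Nat, mirror = -(n : Int) :=
      ⟨(-mirror).toNat, by omega⟩
    rw [pv_foldl_sub]
    have hcong : ((PySem.List.pyRange (-(n : Int)) 0 1).map
        (fun i => -(PySem.List.pyGetD [2 * c, 2 * (d - c)] (PySem.Int.mod (i + 1) 2) 0)))
        = (PySem.List.pyRange (-(n : Int)) 0 1).map
        (fun i => -(if (i + 1) % 2 = 0 then 2 * c else 2 * (d - c))) := by
      apply List.map_congr_left; intro i _; rw [pv_g_eval]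
    rw [hcong, pv_sum_map_neg, pv_neg_sum c d n]
    rw [show (-(-(n : Int))) = (n : Int) from by ring,
        PySem.Int.floordiv_eq_ediv_of_pos (by norm_num),
        PySem.Int.floordiv_eq_ediv_of_pos (by norm_num)]
    ring
  · rw [if_neg hm, if_pos (by omega)]
    obtain ⟨m, rfl⟩ : ∃ m : Nat, mirror = (m : Int) :=
      ⟨mirror.toNat, by omega⟩
    rw [PySem.List.foldl_add]
    have hcong : ((PySem.List.pyRange (m : Int) 0 (-1)).map
        (fun i => PySem.List.pyGetD [2 * c, 2 * (d - c)] (PySem.Int.mod i 2) 0))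
        = (PySem.List.pyRange (m : Int) 0 (-1)).map
        (fun i => if i % 2 = 0 then 2 * c else 2 * (d - c)) := by
      apply List.map_congr_left; intro i _; rw [pv_g_eval]
    rw [hcong, pv_pos_sum c d m]
    rw [PySem.Int.floordiv_eq_ediv_of_pos (by norm_num),
        PySem.Int.floordiv_eq_ediv_of_pos (by norm_num)]
    ring
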